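-- pv_equiv track=rewrite | github.com/LP-RG/subxpat | translator_to_forallZ3.py | generate_output_constants_constraints_for_redundancy
-- ===== SOURCE A (Python) =====
-- from typing import Iterable, List, Callable, Any, Union, Tuple
--
-- def generate_and_join(function: Callable[..., Iterable[str]],
--                       ranges: List[Union[int, Iterable]],
--                       joiner: str,
--                       __internal: List[int] = []) -> str:
--     """
--     Args:
--         function (Callable[..., str]): it must take in one argument per element in ranges.\
--             If 'ranges' contains iterables then the function needs 2 arguments for that (index, value).
--     """
--
--     strings = []
--
--     if len(ranges) == 1:
--         # end case
--         if type(ranges[0]) is int: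
--             for i in range(ranges[0]):
--                 strings.extend(function(*__internal, i))
--         else:
--             for i, v in enumerate(ranges[0]):
--                 strings.extend(function(*__internal, i, v))
--
--     else:
--         # middle case
--         if type(ranges[0]) is int:
--             for i in range(ranges[0]):
--                 strings.append(generate_and_join(function, ranges[1:], joiner, __internal + [i]))
--         else:
--             for i, v in enumerate(ranges[0]):
--                 strings.append(generate_and_join(function, ranges[1:], joiner, __internal + [i, v]))
--
--     return joiner.join(strings)
--
-- def generate_output_constants_constraints_for_redundancy(inputs_count: int,
--                                                          trees_per_output: int,
--                                                          outputs_count: int) -> str: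
--     def generator(_0, o_id, t_id, i_id):
--         p_s = f"p_o{o_id}_t{t_id}_i{i_id}_s"
--         p_l = f"p_o{o_id}_t{t_id}_i{i_id}_l"
--         return [p_s, p_l]
--
--     strings = []
--     for o_id in range(outputs_count):
--         strings.append(f"Implies(Not(p_o{o_id}), Not(Or({generate_and_join(generator, [[o_id], trees_per_output, inputs_count], ', ')})))")
--
--     return ",\n".join(strings)
-- ===== SOURCE B (Python) =====
-- def generate_output_constants_constraints_for_redundancy(inputs_count: int,
--                                                          trees_per_output: int,
--                                                          outputs_count: int) -> str:
--     lines = []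
--     for o_id in range(outputs_count):
--         terms = []
--         for t_id in range(trees_per_output):
--             for i_id in range(inputs_count):
--                 terms.append(f"p_o{o_id}_t{t_id}_i{i_id}_s")
--                 terms.append(f"p_o{o_id}_t{t_id}_i{i_id}_l")
--         lines.append(f"Implies(Not(p_o{o_id}), Not(Or({', '.join(terms)})))")
--     return ",\n".join(lines)
-- ===== Notes on version B (the rewrite author's own statement) =====
-- stated objective: simpler
-- what changed: Replaced the generic accumulator-threading recursive generate_and_join helper (which joins at every recursion level) by two direct nested loops that build the flat term list and join it once per output.
-- intended difference: When inputs_count <= 0 while trees_per_output >= 2 and outputs_count >= 1, A's per-level joining emits stray separators, returning malformed terms like 'Not(Or(, ))', whereas B returns the well-formed 'Not(Or()))' with no spurious commas, which is the intended empty disjunction. — e.g. on generate_output_constants_constraints_for_redundancy(0, 2, 1): A returns "Implies(Not(p_o0), Not(Or(, )))", B returns "Implies(Not(p_o0), Not(Or()))"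
import Mathlib
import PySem

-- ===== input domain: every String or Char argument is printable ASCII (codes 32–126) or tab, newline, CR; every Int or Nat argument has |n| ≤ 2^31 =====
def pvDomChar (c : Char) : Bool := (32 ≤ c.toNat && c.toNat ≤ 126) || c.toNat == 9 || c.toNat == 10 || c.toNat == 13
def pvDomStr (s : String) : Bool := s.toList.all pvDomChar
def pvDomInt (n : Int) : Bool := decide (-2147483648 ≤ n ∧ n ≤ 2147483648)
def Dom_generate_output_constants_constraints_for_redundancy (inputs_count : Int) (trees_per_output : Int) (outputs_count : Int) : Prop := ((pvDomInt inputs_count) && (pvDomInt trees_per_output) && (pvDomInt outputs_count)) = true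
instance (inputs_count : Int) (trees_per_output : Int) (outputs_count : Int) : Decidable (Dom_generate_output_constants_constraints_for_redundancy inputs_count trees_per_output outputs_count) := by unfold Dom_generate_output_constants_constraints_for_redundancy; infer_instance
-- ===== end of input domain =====

-- B replaces the generic level-joining recursive helper by two direct nested loops with a single
-- join per output (simpler); on the degenerate inputs in D_ below A emits stray separators and B's
-- clean empty disjunction is the intended value.

-- ===== PORT A =====
-- An element of A's 'ranges' list: Python Union[int, Iterable] (here the iterables hold ints).
inductive PvRange where
  | int : Int → PvRange
  | list : List Int → PvRange

-- A's inner 'generator(_0, o_id, t_id, i_id)': receives *__internal + indices as one list.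
def pvGenerator (args : List Int) : List String :=
  match args with
  | [_, o_id, t_id, i_id] =>
      ["p_o" ++ PySem.Int.toStr o_id ++ "_t" ++ PySem.Int.toStr t_id ++ "_i" ++ PySem.Int.toStr i_id ++ "_s",
       "p_o" ++ PySem.Int.toStr o_id ++ "_t" ++ PySem.Int.toStr t_id ++ "_i" ++ PySem.Int.toStr i_id ++ "_l"]
  | _ => []  -- unreachable in A's use (Python would raise TypeError on a wrong arity)

-- transliteration of generate_and_join (function specialised to A's generator passed as f)
def pvGenAndJoin (f : List Int → List String) (ranges : List PvRange) (joiner : String)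
    (internal : List Int) : String :=
  match ranges with
  | [] => PySem.Str.join joiner []   -- unreachable in A's use
  | [r] =>
      match r with
      | .int n =>
          PySem.Str.join joiner ((PySem.List.pyRange 0 n 1).flatMap (fun i => f (internal ++ [i])))
      | .list xs =>
          PySem.Str.join joiner ((PySem.List.enumerate xs 0).flatMap (fun p => f (internal ++ [p.1, p.2])))
  | r :: rest =>
      match r with
      | .int n =>
          PySem.Str.join joiner ((PySem.List.pyRange 0 n 1).map
            (fun i => pvGenAndJoin f rest joiner (internal ++ [i])))
      | .list xs =>
          PySem.Str.join joiner ((PySem.List.enumerate xs 0).map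
            (fun p => pvGenAndJoin f rest joiner (internal ++ [p.1, p.2])))

def generate_output_constants_constraints_for_redundancy (inputs_count : Int) (trees_per_output : Int) (outputs_count : Int) : String :=
  PySem.Str.join ",\n" ((PySem.List.pyRange 0 outputs_count 1).map (fun o_id =>
    "Implies(Not(p_o" ++ PySem.Int.toStr o_id ++ "), Not(Or(" ++
      pvGenAndJoin pvGenerator [.list [o_id], .int trees_per_output, .int inputs_count] ", " [] ++
      ")))"))

-- ===== PORT B =====
def generate_output_constants_constraints_for_redundancy_alt (inputs_count : Int) (trees_per_output : Int) (outputs_count : Int) : String :=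
  let lines := (PySem.List.pyRange 0 outputs_count 1).foldl (fun lines o_id =>
    let terms := (PySem.List.pyRange 0 trees_per_output 1).foldl (fun terms t_id =>
      (PySem.List.pyRange 0 inputs_count 1).foldl (fun terms i_id =>
        (terms ++ ["p_o" ++ PySem.Int.toStr o_id ++ "_t" ++ PySem.Int.toStr t_id ++ "_i" ++ PySem.Int.toStr i_id ++ "_s"])
          ++ ["p_o" ++ PySem.Int.toStr o_id ++ "_t" ++ PySem.Int.toStr t_id ++ "_i" ++ PySem.Int.toStr i_id ++ "_l"]) terms) []
    lines ++ ["Implies(Not(p_o" ++ PySem.Int.toStr o_id ++ "), Not(Or(" ++ PySem.Str.join ", " terms ++ ")))"]) []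
  PySem.Str.join ",\n" lines

-- ===== PRECONDITION & SPEC =====
-- When inputs_count <= 0 while trees_per_output >= 2 and outputs_count >= 1, A's per-level joining
-- emits stray separators ('Not(Or(, ))'); B returns the well-formed empty disjunction 'Not(Or()))',
-- which is the intended value.
def D_generate_output_constants_constraints_for_redundancy (inputs_count : Int) (trees_per_output : Int) (outputs_count : Int) : Prop :=
  inputs_count ≤ 0 ∧ 2 ≤ trees_per_output ∧ 1 ≤ outputs_count
instance (inputs_count : Int) (trees_per_output : Int) (outputs_count : Int) : Decidable (D_generate_output_constants_constraints_for_redundancy inputs_count trees_per_output outputs_count) := by unfold D_generate_output_constants_constraints_for_redundancy; infer_instance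

def Spec_generate_output_constants_constraints_for_redundancy (inputs_count : Int) (trees_per_output : Int) (outputs_count : Int) (out : String) : Prop := ¬ D_generate_output_constants_constraints_for_redundancy inputs_count trees_per_output outputs_count → out = generate_output_constants_constraints_for_redundancy_alt inputs_count trees_per_output outputs_count
instance (inputs_count : Int) (trees_per_output : Int) (outputs_count : Int) (out : String) : Decidable (Spec_generate_output_constants_constraints_for_redundancy inputs_count trees_per_output outputs_count out) := by unfold Spec_generate_output_constants_constraints_for_redundancy; infer_instance

def pvDiffWitness_generate_output_constants_constraints_for_redundancy : Int × Int × Int := (0, 2, 1)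
def pvDiffWitnessOut_generate_output_constants_constraints_for_redundancy : String × String :=
  ("Implies(Not(p_o0), Not(Or(, )))", "Implies(Not(p_o0), Not(Or()))")

-- ===== CLAIM (what is proved, stated in full; the proofs are below) =====
def Claim_unchanged_generate_output_constants_constraints_for_redundancy : Prop := ∀ (inputs_count : Int) (trees_per_output : Int) (outputs_count : Int), Dom_generate_output_constants_constraints_for_redundancy inputs_count trees_per_output outputs_count → Spec_generate_output_constants_constraints_for_redundancy inputs_count trees_per_output outputs_count (generate_output_constants_constraints_for_redundancy inputs_count trees_per_output outputs_count)
def Claim_changed_generate_output_constants_constraints_for_redundancy : Prop := Dom_generate_output_constants_constraints_for_redundancy (pvDiffWitness_generate_output_constants_constraints_for_redundancy.1) (pvDiffWitness_generate_output_constants_constraints_for_redundancy.2.1) (pvDiffWitness_generate_output_constants_constraints_for_redundancy.2.2) ∧ D_generate_output_constants_constraints_for_redundancy (pvDiffWitness_generate_output_constants_constraints_for_redundancy.1) (pvDiffWitness_generate_output_constants_constraints_for_redundancy.2.1) (pvDiffWitness_generate_output_constants_constraints_for_redundancy.2.2) ∧ generate_output_constants_constraints_for_redundancy (pvDiffWitness_generate_output_constants_constraints_for_redundancy.1)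 (pvDiffWitness_generate_output_constants_constraints_for_redundancy.2.1) (pvDiffWitness_generate_output_constants_constraints_for_redundancy.2.2) = pvDiffWitnessOut_generate_output_constants_constraints_for_redundancy.1 ∧ generate_output_constants_constraints_for_redundancy_alt (pvDiffWitness_generate_output_constants_constraints_for_redundancy.1) (pvDiffWitness_generate_output_constants_constraints_for_redundancy.2.1) (pvDiffWitness_generate_output_constants_constraints_for_redundancy.2.2) = pvDiffWitnessOut_generate_output_constants_constraints_for_redundancy.2 ∧ pvDiffWitnessOut_generate_output_constants_constraints_for_redundancy.1 ≠ pvDiffWitnessOut_generate_output_constants_constraints_for_redundancy.2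
def Claim_exact_generate_output_constants_constraints_for_redundancy : Prop := ∀ (inputs_count : Int) (trees_per_output : Int) (outputs_count : Int), Dom_generate_output_constants_constraints_for_redundancy inputs_count trees_per_output outputs_count → D_generate_output_constants_constraints_for_redundancy inputs_count trees_per_output outputs_count → generate_output_constants_constraints_for_redundancy inputs_count trees_per_output outputs_count ≠ generate_output_constants_constraints_for_redundancy_alt inputs_count trees_per_output outputs_count

-- ===== LEMMAS AND PROOFS =====

-- String-level join facts
theorem strJoin_singleton (j x : String) : PySem.Str.join j [x] = x := by
  simp [PySem.Str.join, PySem.Chars.join_singleton]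

theorem strJoin_cons_ne (j x : String) (xs : List String) (h : xs ≠ []) :
    PySem.Str.join j (x :: xs) = x ++ j ++ PySem.Str.join j xs := by
  cases xs with
  | nil => exact absurd rfl h
  | cons y ys =>
    apply String.toList_injective
    simp [PySem.Str.join, PySem.Chars.join_cons_cons]

theorem flatMap_ne_nil {α β : Type} (L : List α) (g : α → List β)
    (hL : L ≠ []) (hg : ∀ x ∈ L, g x ≠ []) : L.flatMap g ≠ [] := by
  cases L with
  | nil => exact absurd rfl hL
  | cons x t =>
    simp only [List.flatMap_cons]
    intro h
    exact hg x (by simp) (List.append_eq_nil_iff.mp h).1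

theorem charsJoin_cons_ne (j x : List Char) (ys : List (List Char)) (hy : ys ≠ []) :
    PySem.Chars.join j (x :: ys) = x ++ j ++ PySem.Chars.join j ys := by
  cases ys with
  | nil => exact absurd rfl hy
  | cons y s => exact PySem.Chars.join_cons_cons j x y s

theorem charsJoin_append (j : List Char) (xs ys : List (List Char)) (hx : xs ≠ []) (hy : ys ≠ []) :
    PySem.Chars.join j (xs ++ ys) = PySem.Chars.join j xs ++ j ++ PySem.Chars.join j ys := by
  induction xs with
  | nil => exact absurd rfl hx
  | cons x t ih =>
    cases t with
    | nil =>
      rw [List.singleton_append, charsJoin_cons_ne _ _ _ hy, PySem.Chars.join_singleton]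
    | cons y s =>
      simp only [List.cons_append]
      rw [PySem.Chars.join_cons_cons]
      have h2 := ih (by simp)
      simp only [List.cons_append] at h2
      rw [h2, PySem.Chars.join_cons_cons]
      simp [List.append_assoc]

theorem strJoin_append (j : String) (xs ys : List String) (hx : xs ≠ []) (hy : ys ≠ []) :
    PySem.Str.join j (xs ++ ys) = PySem.Str.join j xs ++ j ++ PySem.Str.join j ys := by
  apply String.toList_injective
  simp only [String.toList_append, PySem.Str.toList_join, List.map_append]
  exact charsJoin_append j.toList _ _ (by simp [hx]) (by simp [hy])

-- joining the per-group joins equals one flat join, provided every group is nonempty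
theorem strJoin_map_join {α : Type} (j : String) (L : List α) (g : α → List String)
    (h : ∀ x ∈ L, g x ≠ []) :
    PySem.Str.join j (L.map (fun x => PySem.Str.join j (g x))) =
      PySem.Str.join j (L.flatMap g) := by
  induction L with
  | nil => simp
  | cons x L' ih =>
    cases L' with
    | nil => simp [strJoin_singleton]
    | cons y t =>
      have hgx : g x ≠ [] := h x (by simp)
      have hrest : ∀ z ∈ y :: t, g z ≠ [] := fun z hz => h z (by simp [hz])
      have hflat : (y :: t).flatMap g ≠ [] := flatMap_ne_nil _ _ (by simp) hrest
      rw [List.map_cons, strJoin_cons_ne _ _ _ (by simp), ih hrest]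
      conv_rhs => rw [List.flatMap_cons]
      rw [strJoin_append j _ _ hgx hflat]

theorem flatMap_single {α β : Type} (l : List α) (g : α → β) :
    l.flatMap (fun x => [g x]) = l.map g := by
  induction l <;> simp_all

-- B's nested folds produce exactly the flat term list
theorem alt_terms (inputs_count trees_per_output o_id : Int) :
    (PySem.List.pyRange 0 trees_per_output 1).foldl (fun terms t_id =>
      (PySem.List.pyRange 0 inputs_count 1).foldl (fun terms i_id =>
        (terms ++ ["p_o" ++ PySem.Int.toStr o_id ++ "_t" ++ PySem.Int.toStr t_id ++ "_i" ++ PySem.Int.toStr i_id ++ "_s"])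
          ++ ["p_o" ++ PySem.Int.toStr o_id ++ "_t" ++ PySem.Int.toStr t_id ++ "_i" ++ PySem.Int.toStr i_id ++ "_l"]) terms) [] =
    (PySem.List.pyRange 0 trees_per_output 1).flatMap (fun t_id =>
      (PySem.List.pyRange 0 inputs_count 1).flatMap (fun i_id => pvGenerator [0, o_id, t_id, i_id])) := by
  rw [PySem.List.foldl_congr_mem _ _
    (fun terms t_id => terms ++ (PySem.List.pyRange 0 inputs_count 1).flatMap
      (fun i_id => pvGenerator [0, o_id, t_id, i_id])) _ ?_]
  · rw [PySem.List.foldl_append_eq_flatMap]; simp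
  · intro acc t_id _
    rw [PySem.List.foldl_congr_mem _ _
      (fun terms i_id => terms ++ pvGenerator [0, o_id, t_id, i_id]) _ ?_]
    · rw [PySem.List.foldl_append_eq_flatMap]
    · intro acc' i_id _
      simp [pvGenerator]

-- unfolding A's recursive helper one level at a time on the concrete ranges triple
theorem genAndJoin_step (inputs_count trees_per_output o_id : Int) :
    pvGenAndJoin pvGenerator [.list [o_id], .int trees_per_output, .int inputs_count] ", " [] =
    PySem.Str.join ", " ((PySem.List.pyRange 0 trees_per_output 1).map (fun t_id =>
      PySem.Str.join ", " ((PySem.List.pyRange 0 inputs_count 1).flatMap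
        (fun i_id => pvGenerator [0, o_id, t_id, i_id])))) := by
  simp only [pvGenAndJoin, PySem.List.enumerate, List.map_cons, List.map_nil]
  rw [strJoin_singleton]; simp

-- A's recursive helper on the triple equals the flat join, outside the degenerate corner
theorem genAndJoin_eq (inputs_count trees_per_output o_id : Int)
    (h : 1 ≤ inputs_count ∨ trees_per_output ≤ 1) :
    pvGenAndJoin pvGenerator [.list [o_id], .int trees_per_output, .int inputs_count] ", " [] =
    PySem.Str.join ", " ((PySem.List.pyRange 0 trees_per_output 1).flatMap (fun t_id =>
      (PySem.List.pyRange 0 inputs_count 1).flatMap (fun i_id => pvGenerator [0, o_id, t_id, i_id]))) := by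
  rw [genAndJoin_step]
  rcases h with hI | hT
  · exact strJoin_map_join _ _ _ (fun t _ => flatMap_ne_nil _ _
      (by
        have : (0:Int) < inputs_count := by omega
        intro hnil
        have := PySem.List.length_pyRange_one (a := 0) (b := inputs_count)
        rw [hnil] at this
        simp at this
        omega)
      (fun i _ => by simp [pvGenerator]))
  · by_cases h0 : trees_per_output ≤ 0
    · rw [PySem.List.pyRange_one_eq_nil h0]; simp
    · have h1 : trees_per_output = 1 := by omega
      subst h1
      have : PySem.List.pyRange 0 1 1 = [(0:Int)] := by
        have := PySem.List.pyRange_one_singleton (a := (0:Int))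
        simpa using this
      rw [this]
      simp [strJoin_singleton]

-- B rewritten as one string per output
theorem alt_eq_map (inputs_count trees_per_output outputs_count : Int) :
    generate_output_constants_constraints_for_redundancy_alt inputs_count trees_per_output outputs_count =
    PySem.Str.join ",\n" ((PySem.List.pyRange 0 outputs_count 1).map (fun o_id =>
      "Implies(Not(p_o" ++ PySem.Int.toStr o_id ++ "), Not(Or(" ++
        PySem.Str.join ", " ((PySem.List.pyRange 0 trees_per_output 1).flatMap (fun t_id =>
          (PySem.List.pyRange 0 inputs_count 1).flatMap (fun i_id => pvGenerator [0, o_id, t_id, i_id]))) ++ ")))")) := by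
  unfold generate_output_constants_constraints_for_redundancy_alt
  simp only []
  rw [PySem.List.foldl_congr_mem _ _
    (fun lines o_id => lines ++
      ["Implies(Not(p_o" ++ PySem.Int.toStr o_id ++ "), Not(Or(" ++
        PySem.Str.join ", " ((PySem.List.pyRange 0 trees_per_output 1).flatMap (fun t_id =>
          (PySem.List.pyRange 0 inputs_count 1).flatMap (fun i_id => pvGenerator [0, o_id, t_id, i_id]))) ++ ")))"]) _ ?_]
  · rw [PySem.List.foldl_append_eq_flatMap]
    simp only [List.nil_append]
    rw [flatMap_single]
  · intro acc o _
    rw [alt_terms]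

-- length bookkeeping for the tight theorem
theorem strJoin_nil (j : String) : PySem.Str.join j [] = "" := by
  apply String.toList_injective
  simp [PySem.Str.toList_join, PySem.Chars.join_nil]

theorem charsJoin_length (j : List Char) (parts : List (List Char)) :
    (PySem.Chars.join j parts).length =
      (parts.map List.length).sum + j.length * (parts.length - 1) := by
  induction parts with
  | nil => simp [PySem.Chars.join_nil]
  | cons x t ih =>
    cases t with
    | nil => simp [PySem.Chars.join_singleton]
    | cons y s =>
      rw [PySem.Chars.join_cons_cons]
      simp only [List.length_append, ih, List.map_cons, List.sum_cons, List.length_cons]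
      simp only [Nat.add_sub_cancel, Nat.mul_succ]
      ring

theorem sum_map_add_mul {α : Type} (l : List α) (g : α → Nat) (d : Nat) :
    (l.map (fun x => g x + d)).sum = (l.map g).sum + l.length * d := by
  induction l with
  | nil => simp
  | cons x t ih => simp [ih, Nat.succ_mul]; ring

-- ===== VERDICT (by name: the statement is the Claim_ definition above) =====
theorem generate_output_constants_constraints_for_redundancy_spec : Claim_unchanged_generate_output_constants_constraints_for_redundancy := by
  intro I T O _ hnd
  unfold D_generate_output_constants_constraints_for_redundancy at hnd
  push Not at hnd
  show _ = _
  rw [alt_eq_map]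
  unfold generate_output_constants_constraints_for_redundancy
  refine congrArg (PySem.Str.join ",\n") (List.map_congr_left ?_)
  intro o ho
  have hO : 1 ≤ O := by
    have := (PySem.List.mem_pyRange_one).mp ho
    omega
  have hcase : 1 ≤ I ∨ T ≤ 1 := by
    by_cases hI : 1 ≤ I
    · exact Or.inl hI
    · exact Or.inr (by have := hnd (by omega); omega)
  rw [genAndJoin_eq I T o hcase]

theorem generate_output_constants_constraints_for_redundancy_changed : Claim_changed_generate_output_constants_constraints_for_redundancy := by
  unfold Claim_changed_generate_output_constants_constraints_for_redundancy; decide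

theorem generate_output_constants_constraints_for_redundancy_tight : Claim_exact_generate_output_constants_constraints_for_redundancy := by
  intro I T O _ hD heq
  obtain ⟨hI, hT, hO⟩ := hD
  have hIr : PySem.List.pyRange 0 I 1 = [] := PySem.List.pyRange_one_eq_nil hI
  have hA : generate_output_constants_constraints_for_redundancy I T O =
      PySem.Str.join ",\n" ((PySem.List.pyRange 0 O 1).map (fun o_id =>
        "Implies(Not(p_o" ++ PySem.Int.toStr o_id ++ "), Not(Or(" ++
          PySem.Str.join ", " ((PySem.List.pyRange 0 T 1).map (fun _ => "")) ++ ")))")) := by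
    unfold generate_output_constants_constraints_for_redundancy
    refine congrArg (PySem.Str.join ",\n") (List.map_congr_left ?_)
    intro o _
    rw [genAndJoin_step]
    simp only [hIr, List.flatMap_nil, strJoin_nil]
  have hB : generate_output_constants_constraints_for_redundancy_alt I T O =
      PySem.Str.join ",\n" ((PySem.List.pyRange 0 O 1).map (fun o_id =>
        "Implies(Not(p_o" ++ PySem.Int.toStr o_id ++ "), Not(Or(" ++
          PySem.Str.join ", " [] ++ ")))")) := by
    rw [alt_eq_map]
    refine congrArg (PySem.Str.join ",\n") (List.map_congr_left ?_)
    intro o _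
    simp only [hIr, List.flatMap_nil]
    exact congrArg (fun l => "Implies(Not(p_o" ++ PySem.Int.toStr o ++ "), Not(Or(" ++ PySem.Str.join ", " l ++ ")))") (by simp)
  rw [hA, hB] at heq
  have hlen := congrArg (fun s => s.toList.length) heq
  simp only [PySem.Str.toList_join, charsJoin_length, List.map_map, List.length_map] at hlen
  -- per-output lengths: A's line is B's line plus the stray-separator block
  set dlen : Nat := (PySem.Str.join ", " ((PySem.List.pyRange 0 T 1).map (fun _ => ""))).toList.length with hdlen_def
  have hdlen : 2 ≤ dlen := by
    rw [hdlen_def, PySem.Str.toList_join, charsJoin_length]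
    have hlenT : ((PySem.List.pyRange 0 T 1).map (fun _ => ("" : String))).length = T.toNat := by
      simp [PySem.List.length_pyRange_one]
    have h2 : (String.toList ", ").length = 2 := by decide
    simp only [List.map_map, List.length_map, PySem.List.length_pyRange_one, h2]
    have : (2:Nat) ≤ (T - 0).toNat - 1 + 1 := by omega
    omega
  have hpoint : ∀ o ∈ PySem.List.pyRange 0 O 1,
      (List.length ∘ String.toList ∘ (fun o_id =>
        "Implies(Not(p_o" ++ PySem.Int.toStr o_id ++ "), Not(Or(" ++
          PySem.Str.join ", " ((PySem.List.pyRange 0 T 1).map (fun _ => "")) ++ ")))")) o =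
      (List.length ∘ String.toList ∘ (fun o_id =>
        "Implies(Not(p_o" ++ PySem.Int.toStr o_id ++ "), Not(Or(" ++
          PySem.Str.join ", " [] ++ ")))")) o + dlen := by
    intro o _
    simp only [Function.comp, String.toList_append, List.length_append, strJoin_nil, hdlen_def]
    have : (String.toList "").length = 0 := by decide
    omega
  rw [List.map_congr_left hpoint, sum_map_add_mul] at hlen
  have hn : 1 ≤ (PySem.List.pyRange 0 O 1).length := by
    rw [PySem.List.length_pyRange_one]
    omega
  have hpos : 0 < (PySem.List.pyRange 0 O 1).length * dlen :=
    Nat.mul_pos (by omega) (by omega)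
  omega
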